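-- pv_equiv track=rewrite | github.com/albabernal03/Lego | lego_2.0.py | descifrar_frase_con_desplazamiento
-- ===== SOURCE A (Python) =====
-- def cifrar(texto, desplazamiento):
--     resultado = ""
--     for char in texto:
--         if char.isalpha():
--             shift = (ord(char.lower()) - ord('a') + desplazamiento) % 26 + ord('a')
--             resultado += chr(shift) if char.islower() else chr(shift).upper()
--         else:
--             resultado += char
--     return resultado
--
-- def descifrar_frase_con_desplazamiento(frase_cifrada, desplazamientos):
--     palabras = frase_cifrada.split()
--     frase_descifrada = ""
--     #desplazamientos es un str de numeros separados por comas
--     desplazamientos = list(map(int, desplazamientos.split(',')))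
--     for palabra, desplazamiento in zip(palabras, desplazamientos):
--         palabra_descifrada = cifrar(palabra, -desplazamiento)  # Invertir el desplazamiento para descifrar
--         frase_descifrada += palabra_descifrada + " "
--     return frase_descifrada.strip()
-- ===== SOURCE B (Python) =====
-- def descifrar_frase_con_desplazamiento(frase_cifrada, desplazamientos):
--     shifts = list(map(int, desplazamientos.split(',')))
--     abc = 'abcdefghijklmnopqrstuvwxyz'
--     descifradas = []
--     for palabra, d in zip(frase_cifrada.split(), shifts):
--         clave = ''.join(chr((i - d) % 26 + ord('a')) for i in range(26))
--         tabla = str.maketrans(abc + abc.upper(), clave + clave.upper())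
--         descifradas.append(palabra.translate(tabla))
--     return ' '.join(descifradas)
-- ===== Notes on version B (the rewrite author's own statement) =====
-- stated objective: idiomatic
-- what changed: Per-word Caesar decryption is done with a precomputed translation table (str.maketrans + str.translate) instead of A's per-character branch-and-arithmetic loop, and the result is assembled with ' '.join of a list instead of A's append-word-plus-space-then-strip accumulation.
import Mathlib
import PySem

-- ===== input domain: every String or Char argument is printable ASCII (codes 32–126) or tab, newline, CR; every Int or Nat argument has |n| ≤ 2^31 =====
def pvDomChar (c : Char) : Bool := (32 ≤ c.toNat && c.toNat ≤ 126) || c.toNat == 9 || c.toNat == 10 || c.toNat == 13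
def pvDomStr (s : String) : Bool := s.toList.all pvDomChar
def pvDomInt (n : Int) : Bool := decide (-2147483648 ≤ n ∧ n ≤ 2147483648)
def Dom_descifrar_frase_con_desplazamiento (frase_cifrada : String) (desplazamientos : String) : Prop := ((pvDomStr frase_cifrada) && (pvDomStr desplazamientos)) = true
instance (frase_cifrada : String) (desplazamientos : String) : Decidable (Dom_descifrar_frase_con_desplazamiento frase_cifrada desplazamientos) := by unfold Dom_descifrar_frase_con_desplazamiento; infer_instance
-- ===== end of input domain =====

-- B replaces A's per-character arithmetic loop by a per-word translation table (str.maketrans /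
-- str.translate) and assembles the result with ' '.join instead of append-then-strip; same values.

-- ===== PORT A =====
-- cifrar's per-character contribution (resultado += exactly one char per iteration)
def pvCharA (c : Char) (desplazamiento : Int) : Char :=
  if PySem.Chars.isalpha c then
    -- shift = (ord(char.lower()) - ord('a') + desplazamiento) % 26 + ord('a')
    let shift := PySem.Int.mod (((PySem.Chars.lowerChar c).toNat : Int) - 97 + desplazamiento) 26 + 97
    if PySem.Chars.islower c then Char.ofNat shift.toNat else PySem.Chars.upperChar (Char.ofNat shift.toNat)
  else c

-- cifrar(texto, desplazamiento): resultado accumulated left to right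
def pvCifrar (texto : List Char) (desplazamiento : Int) : List Char :=
  texto.foldl (fun resultado c => resultado ++ [pvCharA c desplazamiento]) []

def descifrar_frase_con_desplazamiento (frase_cifrada : String) (desplazamientos : String) : String :=
  let palabras := PySem.Chars.split₀ frase_cifrada.toList
  -- list(map(int, desplazamientos.split(','))): int() raises ValueError on a bad chunk — excluded by Pre_
  let desps := (PySem.Chars.splitOn desplazamientos.toList [',']).map
    (fun cs => (PySem.Int.ofChars? cs).getD 0)
  let body := (palabras.zip desps).foldl
    (fun frase_descifrada pd => frase_descifrada ++ (pvCifrar pd.1 (-pd.2) ++ [' '])) []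
  String.ofList (PySem.Chars.strip body)

-- ===== PORT B =====
def pvAbc : List Char := ['a','b','c','d','e','f','g','h','i','j','k','l','m','n','o','p','q','r','s','t','u','v','w','x','y','z']

-- clave = ''.join(chr((i - d) % 26 + ord('a')) for i in range(26))
def pvClave (d : Int) : List Char :=
  (PySem.List.pyRange 0 26 1).map (fun i => Char.ofNat ((PySem.Int.mod (i - d) 26 + 97).toNat))

-- str.maketrans(abc + abc.upper(), clave + clave.upper()) as an association list (keys are distinct)
def pvTabla (d : Int) : List (Char × Char) :=
  (pvAbc ++ PySem.Chars.upper pvAbc).zip (pvClave d ++ PySem.Chars.upper (pvClave d))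

-- str.translate: chars absent from the table stay unchanged
def pvTranslate (tabla : List (Char × Char)) (w : List Char) : List Char :=
  w.map (fun c => ((tabla.find? (fun p => p.1 == c)).map Prod.snd).getD c)

def descifrar_frase_con_desplazamiento_alt (frase_cifrada : String) (desplazamientos : String) : String :=
  let shifts := (PySem.Chars.splitOn desplazamientos.toList [',']).map
    (fun cs => (PySem.Int.ofChars? cs).getD 0)
  let descifradas := ((PySem.Chars.split₀ frase_cifrada.toList).zip shifts).map
    (fun pd => pvTranslate (pvTabla pd.2) pd.1)
  String.ofList (PySem.Chars.join [' '] descifradas)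

-- ===== PRECONDITION & SPEC =====
-- Pre_ excludes exactly the inputs where int() raises ValueError on a comma-separated chunk of desplazamientos
def Pre_descifrar_frase_con_desplazamiento (frase_cifrada : String) (desplazamientos : String) : Prop :=
  ∀ cs ∈ PySem.Chars.splitOn desplazamientos.toList [','], (PySem.Int.ofChars? cs).isSome = true
instance (frase_cifrada : String) (desplazamientos : String) : Decidable (Pre_descifrar_frase_con_desplazamiento frase_cifrada desplazamientos) := by unfold Pre_descifrar_frase_con_desplazamiento; infer_instance

def pvWitness_descifrar_frase_con_desplazamiento : String × String := ("Ipmb Owpfq", "1,2")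

def Spec_descifrar_frase_con_desplazamiento (frase_cifrada : String) (desplazamientos : String) (out : String) : Prop := out = descifrar_frase_con_desplazamiento_alt frase_cifrada desplazamientos
instance (frase_cifrada : String) (desplazamientos : String) (out : String) : Decidable (Spec_descifrar_frase_con_desplazamiento frase_cifrada desplazamientos out) := by unfold Spec_descifrar_frase_con_desplazamiento; infer_instance

-- ===== CLAIM (what is proved, stated in full; the proofs are below) =====
def Claim_equal_descifrar_frase_con_desplazamiento : Prop := ∀ (frase_cifrada : String) (desplazamientos : String), Dom_descifrar_frase_con_desplazamiento frase_cifrada desplazamientos → Pre_descifrar_frase_con_desplazamiento frase_cifrada desplazamientos → Spec_descifrar_frase_con_desplazamiento frase_cifrada desplazamientos (descifrar_frase_con_desplazamiento frase_cifrada desplazamientos)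

-- ===== LEMMAS AND PROOFS =====

-- B's table lookup computes exactly A's per-character Caesar step
lemma pvLookup_eq_charA (d : Int) (c : Char) :
    ((pvTabla d).find? (fun p => p.1 == c) |>.map Prod.snd).getD c = pvCharA c (-d) := by
  by_cases hl : 97 ≤ c.toNat ∧ c.toNat ≤ 122
  · obtain ⟨n, h1, h2, rfl⟩ : ∃ n, 97 ≤ n ∧ n ≤ 122 ∧ c = Char.ofNat n :=
      ⟨c.toNat, hl.1, hl.2, (Char.ofNat_toNat c).symm⟩
    interval_cases n <;>
      simp [pvTabla, pvAbc, pvClave, PySem.Chars.upper, pvCharA,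
        PySem.Chars.isalpha, PySem.Chars.islower, PySem.Chars.isupper, PySem.Chars.lowerChar,
        show PySem.List.pyRange 0 26 1 = [0,1,2,3,4,5,6,7,8,9,10,11,12,13,14,15,16,17,18,19,20,21,22,23,24,25] from by decide,
        List.find?] <;> (try (congr 1 <;> omega))
  · by_cases hu : 65 ≤ c.toNat ∧ c.toNat ≤ 90
    · obtain ⟨n, h1, h2, rfl⟩ : ∃ n, 65 ≤ n ∧ n ≤ 90 ∧ c = Char.ofNat n :=
        ⟨c.toNat, hu.1, hu.2, (Char.ofNat_toNat c).symm⟩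
      interval_cases n <;>
        simp [pvTabla, pvAbc, pvClave, PySem.Chars.upper, pvCharA,
          PySem.Chars.isalpha, PySem.Chars.islower, PySem.Chars.isupper, PySem.Chars.lowerChar,
          show PySem.List.pyRange 0 26 1 = [0,1,2,3,4,5,6,7,8,9,10,11,12,13,14,15,16,17,18,19,20,21,22,23,24,25] from by decide,
          List.find?] <;> (try (congr 1 <;> omega))
    · have hfind : (pvTabla d).find? (fun p => p.1 == c) = none := by
        rw [List.find?_eq_none]
        rintro ⟨k, v⟩ hkv he
        have hk := (List.of_mem_zip hkv).1
        have hkeys : pvAbc ++ PySem.Chars.upper pvAbc =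
            ['a','b','c','d','e','f','g','h','i','j','k','l','m','n','o','p','q','r','s','t','u','v','w','x','y','z',
             'A','B','C','D','E','F','G','H','I','J','K','L','M','N','O','P','Q','R','S','T','U','V','W','X','Y','Z'] := by decide
        rw [hkeys] at hk
        simp only [beq_iff_eq] at he
        subst he
        fin_cases hk <;> first | exact hl (by decide) | exact hu (by decide)
      have hcA : pvCharA c (-d) = c := by
        have halpha : PySem.Chars.isalpha c = false := by
          simp only [PySem.Chars.isalpha, PySem.Chars.islower, PySem.Chars.isupper,
            Char.le_def, Bool.or_eq_false_iff, Bool.and_eq_false_iff,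
            decide_eq_false_iff_not, UInt32.le_iff_toNat_le,
            show 'a'.val.toNat = 97 from rfl, show 'z'.val.toNat = 122 from rfl,
            show 'A'.val.toNat = 65 from rfl, show 'Z'.val.toNat = 90 from rfl]
          unfold Char.toNat at hl hu
          omega
        simp [pvCharA, halpha]
      rw [hfind, hcA]; rfl

lemma isspace_ofNat_false (n : Nat) (h1 : 33 ≤ n) (h2 : n ≤ 126) :
    PySem.Chars.isspace (Char.ofNat n) = false := by
  have hv : n.isValidChar := Or.inl (by omega)
  simp [PySem.Chars.isspace, Char.toNat_ofNat, hv]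
  omega

lemma upperChar_ofNat (n : Nat) (h1 : 97 ≤ n) (h2 : n ≤ 122) :
    PySem.Chars.upperChar (Char.ofNat n) = Char.ofNat (n - 32) := by
  have hv : n.isValidChar := Or.inl (by omega)
  have ht : (Char.ofNat n).toNat = n := by rw [Char.toNat_ofNat, if_pos hv]
  have hlow : PySem.Chars.islower (Char.ofNat n) = true := by
    simp only [PySem.Chars.islower, Char.le_def, UInt32.le_iff_toNat_le,
      show 'a'.val.toNat = 97 from rfl, show 'z'.val.toNat = 122 from rfl,
      Bool.and_eq_true, decide_eq_true_eq]
    unfold Char.toNat at ht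
    omega
  rw [PySem.Chars.upperChar, if_pos hlow, ht]

lemma charA_nonspace (c : Char) (d : Int) (h : PySem.Chars.isspace c = false) :
    PySem.Chars.isspace (pvCharA c d) = false := by
  simp only [pvCharA]
  by_cases ha : PySem.Chars.isalpha c
  · rw [if_pos ha]
    have h0 : 0 ≤ PySem.Int.mod (((PySem.Chars.lowerChar c).toNat : Int) - 97 + d) 26 :=
      PySem.Int.mod_nonneg _ (by norm_num)
    have h1 : PySem.Int.mod (((PySem.Chars.lowerChar c).toNat : Int) - 97 + d) 26 < 26 :=
      PySem.Int.mod_lt _ (by norm_num)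
    by_cases hlo : PySem.Chars.islower c
    · rw [if_pos hlo]; exact isspace_ofNat_false _ (by omega) (by omega)
    · rw [if_neg hlo, upperChar_ofNat _ (by omega) (by omega)]
      exact isspace_ofNat_false _ (by omega) (by omega)
  · rw [if_neg ha]; exact h

-- split₀.go invariant: every produced word is nonempty and whitespace-free
lemma split_go_inv (s : List Char) : ∀ (cur : List Char) (acc : List (List Char)),
    (∀ c ∈ cur, PySem.Chars.isspace c = false) →
    (∀ w ∈ acc, w ≠ [] ∧ ∀ c ∈ w, PySem.Chars.isspace c = false) →
    ∀ w ∈ PySem.Chars.split₀.go s cur acc, w ≠ [] ∧ ∀ c ∈ w, PySem.Chars.isspace c = false := by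
  induction s with
  | nil =>
    intro cur acc hcur hacc w hw
    rw [PySem.Chars.split₀.go] at hw
    by_cases he : cur.isEmpty
    · rw [if_pos he, List.mem_reverse] at hw; exact hacc w hw
    · rw [if_neg he, List.mem_reverse] at hw
      rcases List.mem_cons.mp hw with rfl | hw
      · refine ⟨by simpa using (List.isEmpty_eq_false_iff.mp (by simpa using he)), ?_⟩
        intro c hc; exact hcur c (List.mem_reverse.mp hc)
      · exact hacc w hw
  | cons a s ih =>
    intro cur acc hcur hacc w hw
    rw [PySem.Chars.split₀.go] at hw
    by_cases hsp : PySem.Chars.isspace a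
    · rw [if_pos hsp] at hw
      by_cases he : cur.isEmpty
      · rw [if_pos he] at hw; exact ih [] acc (by simp) hacc w hw
      · rw [if_neg he] at hw
        refine ih [] _ (by simp) ?_ w hw
        intro v hv
        rcases List.mem_cons.mp hv with rfl | hv
        · refine ⟨by simpa using (List.isEmpty_eq_false_iff.mp (by simpa using he)), ?_⟩
          intro c hc; exact hcur c (List.mem_reverse.mp hc)
        · exact hacc v hv
    · rw [if_neg hsp] at hw
      refine ih (a :: cur) acc ?_ hacc w hw
      intro c hc
      rcases List.mem_cons.mp hc with rfl | hc
      · simpa using hsp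
      · exact hcur c hc

lemma split₀_words (s : List Char) :
    ∀ w ∈ PySem.Chars.split₀ s, w ≠ [] ∧ ∀ c ∈ w, PySem.Chars.isspace c = false :=
  split_go_inv s [] [] (by simp) (by simp)

lemma dropWhile_eq_self_of_all {l : List Char} (h : ∀ c ∈ l, PySem.Chars.isspace c = false) :
    l.dropWhile PySem.Chars.isspace = l := by
  cases l with
  | nil => rfl
  | cons c t => rw [List.dropWhile_cons, if_neg (by simp [h c (by simp)])]

lemma dropWhile_append_of_head {A B : List Char} (hA : A ≠ [])
    (hself : A.dropWhile PySem.Chars.isspace = A) :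
    (A ++ B).dropWhile PySem.Chars.isspace = A ++ B := by
  cases A with
  | nil => exact absurd rfl hA
  | cons a t =>
    by_cases hp : PySem.Chars.isspace a
    · rw [List.dropWhile_cons, if_pos hp] at hself
      have := List.length_dropWhile_le (p := PySem.Chars.isspace) (l := t)
      rw [hself] at this; simp at this
    · rw [List.cons_append, List.dropWhile_cons, if_neg (by simp [hp])]

lemma join_cons_cons (w v : List Char) (r : List (List Char)) :
    PySem.Chars.join [' '] (w :: v :: r) = w ++ ' ' :: PySem.Chars.join [' '] (v :: r) := by
  simp [PySem.Chars.join, List.intercalate, List.intersperse]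

lemma join_singleton' (w : List Char) : PySem.Chars.join [' '] [w] = w := by
  simp [PySem.Chars.join, List.intercalate, List.intersperse]

lemma join_rev_dropWhile (ws : List (List Char))
    (h : ∀ w ∈ ws, w ≠ [] ∧ ∀ c ∈ w, PySem.Chars.isspace c = false) (hne : ws ≠ []) :
    (PySem.Chars.join [' '] ws).reverse.dropWhile PySem.Chars.isspace
      = (PySem.Chars.join [' '] ws).reverse := by
  induction ws with
  | nil => exact absurd rfl hne
  | cons w r ih =>
    cases r with
    | nil =>
      rw [join_singleton']
      exact dropWhile_eq_self_of_all (fun c hc => (h w (by simp)).2 c (List.mem_reverse.mp hc))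
    | cons v r' =>
      rw [join_cons_cons, List.reverse_append, List.reverse_cons]
      have hJ := ih (fun u hu => h u (List.mem_cons_of_mem _ hu)) (by simp)
      have hJne : (PySem.Chars.join [' '] (v :: r')).reverse ≠ [] := by
        have hv := (h v (by simp)).1
        cases r' with
        | nil => rw [join_singleton']; simpa using hv
        | cons u r'' => rw [join_cons_cons]; simp
      rw [List.append_assoc]
      exact dropWhile_append_of_head hJne hJ

lemma flatMap_eq_join_append (ws : List (List Char)) (hne : ws ≠ []) :
    ws.flatMap (fun w => w ++ [' ']) = PySem.Chars.join [' '] ws ++ [' '] := by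
  induction ws with
  | nil => exact absurd rfl hne
  | cons w r ih =>
    cases r with
    | nil => simp
    | cons v r' =>
      rw [List.flatMap_cons, ih (by simp), join_cons_cons]
      simp

-- gluing: strip of the words-with-trailing-space concatenation is the ' '-join
lemma strip_flat_eq_join (ws : List (List Char))
    (h : ∀ w ∈ ws, w ≠ [] ∧ ∀ c ∈ w, PySem.Chars.isspace c = false) :
    PySem.Chars.strip (ws.flatMap (fun w => w ++ [' '])) = PySem.Chars.join [' '] ws := by
  cases ws with
  | nil => rfl
  | cons w r =>
    rw [flatMap_eq_join_append _ (by simp)]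
    rw [PySem.Chars.strip, PySem.Chars.lstrip, PySem.Chars.rstrip]
    have hhead : (PySem.Chars.join [' '] (w :: r) ++ [' ']).dropWhile PySem.Chars.isspace
        = PySem.Chars.join [' '] (w :: r) ++ [' '] := by
      have hwne := (h w (by simp)).1
      have hwself : PySem.Chars.join [' '] (w :: r) ≠ [] := by
        cases r with
        | nil => rw [join_singleton']; exact hwne
        | cons v r' => rw [join_cons_cons]; simp
      refine dropWhile_append_of_head hwself ?_
      cases r with
      | nil =>
        rw [join_singleton']
        exact dropWhile_eq_self_of_all (h w (by simp)).2
      | cons v r' =>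
        rw [join_cons_cons]
        cases w with
        | nil => exact absurd rfl (h [] (by simp)).1
        | cons c t =>
          rw [List.cons_append, List.dropWhile_cons,
            if_neg (by simp [(h (c :: t) (by simp)).2 c (by simp)])]
    rw [hhead, List.reverse_append]
    show (([' '].reverse ++ _).dropWhile _).reverse = _
    rw [show ([' '] : List Char).reverse = [' '] from rfl, List.cons_append, List.dropWhile_cons,
      if_pos (by decide), List.nil_append,
      join_rev_dropWhile (w :: r) h (by simp), List.reverse_reverse]

-- ===== VERDICT (by name: the statement is the Claim_ definition above) =====
theorem descifrar_frase_con_desplazamiento_spec : Claim_equal_descifrar_frase_con_desplazamiento := by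
  intro f dstr hdom hpre
  unfold Spec_descifrar_frase_con_desplazamiento
  unfold descifrar_frase_con_desplazamiento descifrar_frase_con_desplazamiento_alt
  simp only []
  set shifts := (PySem.Chars.splitOn dstr.toList [',']).map
    (fun cs => (PySem.Int.ofChars? cs).getD 0) with hshifts
  set zp := (PySem.Chars.split₀ f.toList).zip shifts with hzp
  have hB : zp.map (fun pd => pvTranslate (pvTabla pd.2) pd.1)
      = zp.map (fun pd => pd.1.map (fun c => pvCharA c (-pd.2))) := by
    simp [pvTranslate, pvLookup_eq_charA]
  have hA : zp.foldl (fun acc pd => acc ++ (pvCifrar pd.1 (-pd.2) ++ [' '])) []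
      = (zp.map (fun pd => pd.1.map (fun c => pvCharA c (-pd.2)))).flatMap
          (fun w => w ++ [' ']) := by
    rw [PySem.List.foldl_append_eq_flatMap, List.flatMap_map]
    simp only [pvCifrar, PySem.List.foldl_append_singleton_eq_map, List.nil_append]
  rw [hA, hB]
  have hprop : ∀ w ∈ zp.map (fun pd => pd.1.map (fun c => pvCharA c (-pd.2))),
      w ≠ [] ∧ ∀ c ∈ w, PySem.Chars.isspace c = false := by
    intro w hw
    obtain ⟨pd, hpd, rfl⟩ := List.mem_map.mp hw
    obtain ⟨p, sh⟩ := pd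
    have hp := (List.of_mem_zip hpd).1
    have hword := split₀_words f.toList p hp
    constructor
    · simpa using hword.1
    · intro c hc
      obtain ⟨c0, hc0, rfl⟩ := List.mem_map.mp hc
      exact charA_nonspace c0 _ (hword.2 c0 hc0)
  rw [strip_flat_eq_join _ hprop]
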